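-- pv_equiv track=rewrite | github.com/honeyhyuni/algorithm | programmers_level1/140108_programmers.py | solution
-- ===== SOURCE A (Python) =====
-- def solution(s):
--     answer = 0
--     x, x_cnt, temp_cnt = "", 0, 0
--     for i in s:
--         if not x:
--             x = i
--             x_cnt += 1
--         elif x != i:
--             temp_cnt += 1
--         else:
--             x_cnt += 1
--         if x_cnt == temp_cnt:
--             answer += 1
--             x, x_cnt, temp_cnt = "", 0, 0
--     return answer + 1 if x else answer
-- ===== SOURCE B (Python) =====
-- def solution(s):
--     n = len(s)
--     answer = 0
--     i = 0
--     while i < n: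
--         answer += 1
--         first = s[i]
--         bal = 1
--         p = i + 1
--         while True:
--             q = s.find(first, p)
--             if q == -1:
--                 q = n
--             gap = q - p
--             if bal <= gap:
--                 i = p + bal
--                 break
--             if q == n:
--                 i = n
--                 break
--             bal += 1 - gap
--             p = q + 1
--     return answer
-- ===== Notes on version B (the rewrite author's own statement) =====
-- stated objective: alternative
-- what changed: Replaced A's per-character scan with two counters (same/other) and in-place state reset by a segment-jumping algorithm: per segment B uses str.find to jump between occurrences of the segment's first character and gap arithmetic on a single signed balance to locate the segment end, never examining the intervening characters one by one.
import Mathlib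
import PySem

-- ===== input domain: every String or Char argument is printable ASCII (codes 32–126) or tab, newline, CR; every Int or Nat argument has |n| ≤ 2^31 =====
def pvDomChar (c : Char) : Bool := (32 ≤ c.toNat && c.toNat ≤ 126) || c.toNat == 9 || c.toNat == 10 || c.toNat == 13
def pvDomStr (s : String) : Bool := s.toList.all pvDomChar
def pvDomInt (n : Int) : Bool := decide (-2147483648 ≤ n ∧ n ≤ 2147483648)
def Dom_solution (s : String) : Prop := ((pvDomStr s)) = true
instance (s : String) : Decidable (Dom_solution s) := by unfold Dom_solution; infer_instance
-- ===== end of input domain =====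

-- B replaces A's per-character scan with two counters and in-place reset by a
-- segment-jumping algorithm: per segment it uses str.find to jump between
-- occurrences of the segment's first character and gap arithmetic on a signed
-- balance to locate the segment end; objective: alternative.

-- ===== PORT A =====
-- Python's x is always "" or a one-character string; ported exactly as
-- Option Char (none = "", some c = the one-character string c).
def solutionStepA (st : Int × Option Char × Int × Int) (i : Char) : Int × Option Char × Int × Int :=
  let (answer, x, x_cnt, temp_cnt) := st
  let (x, x_cnt, temp_cnt) :=
    match x with
    | none => ((some i : Option Char), x_cnt + 1, temp_cnt)          -- if not x
    | some c => if c ≠ i then (some c, x_cnt, temp_cnt + 1)          -- elif x != i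
                else (some c, x_cnt + 1, temp_cnt)                   -- else
  if x_cnt = temp_cnt then (answer + 1, (none : Option Char), (0 : Int), (0 : Int))
  else (answer, x, x_cnt, temp_cnt)

-- `return answer + 1 if x else answer`
def solutionFinA (st : Int × Option Char × Int × Int) : Int :=
  match st.2.1 with
  | some _ => st.1 + 1
  | none => st.1

def solution (s : String) : Int :=
  solutionFinA (s.toList.foldl solutionStepA (0, none, 0, 0))

-- ===== PORT B =====
-- Source B's inner `while True` loop: q = s.find(first, p), sentinel -1 -> n, gap
-- arithmetic on the balance.  fuel is only a totality guard for the while loop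
-- (solution_alt supplies len(s)+1, enough since p strictly increases; proved below).
def innerB (s : String) (n : Int) (first : Char) : Nat → Int → Int → Int
  | 0, bal, p => p + bal
  | fuel + 1, bal, p =>
      let q0 := PySem.Str.findFrom s (String.singleton first) p
      let q := if q0 = -1 then n else q0
      let gap := q - p
      if bal ≤ gap then p + bal                   -- i = p + bal; break
      else if q = n then n                        -- i = n; break
      else innerB s n first fuel (bal + (1 - gap)) (q + 1)   -- bal += 1 - gap; p = q + 1

-- Source B's outer `while i < n` loop; fuel is again only a totality guard.
def outerB (s : String) (n : Int) : Nat → Int → Int → Int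
  | 0, answer, _ => answer
  | fuel + 1, answer, i =>
      if i < n then
        let first := (PySem.Str.pyGet? s i).getD ' '   -- s[i]; in range under the guard i < n
        outerB s n fuel (answer + 1) (innerB s n first (s.toList.length + 1) 1 (i + 1))
      else answer

def solution_alt (s : String) : Int :=
  let n := PySem.Str.len s
  outerB s n (s.toList.length + 1) 0 0

-- ===== PRECONDITION & SPEC =====
def Spec_solution (s : String) (out : Int) : Prop := out = solution_alt s
instance (s : String) (out : Int) : Decidable (Spec_solution s out) := by unfold Spec_solution; infer_instance

-- ===== CLAIM (what is proved, stated in full; the proofs are below) =====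
def Claim_equal_solution : Prop := ∀ (s : String), Dom_solution s → Spec_solution s (solution s)

-- ===== LEMMAS AND PROOFS =====

-- Per-character reference scan: consumes chars updating the signed balance until
-- it hits 0; returns the remaining suffix (none = exhausted with balance > 0).
-- Both ports are proved equal to a segment recursion built on it.
def findRest (first : Char) (bal : Int) : List Char → Option (List Char)
  | [] => none
  | c :: rest =>
      let bal := bal + (if c = first then 1 else -1)
      if bal = 0 then some rest else findRest first bal rest

theorem findRest_length_le (first : Char) :
    ∀ (l : List Char) (bal : Int) (r : List Char),
      findRest first bal l = some r → r.length ≤ l.length := by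
  intro l
  induction l with
  | nil => intro bal r h; simp [findRest] at h
  | cons c rest ih =>
      intro bal r h
      simp only [findRest] at h
      split at h <;> split at h
      all_goals first
        | (cases h; simp)
        | exact le_trans (ih _ _ h) (Nat.le_succ _)

-- reference segment count: one per started segment, recursing past the zero crossing
def solBalt : List Char → Int
  | [] => 0
  | c :: rest =>
      match h : findRest c 1 rest with
      | none => 1
      | some r => 1 + solBalt r
termination_by l => l.length
decreasing_by
  simp only [List.length_cons]
  exact Nat.lt_succ_of_le (findRest_length_le c rest 1 r h)

def contB (first : Char) (bal : Int) (l : List Char) : Int :=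
  match findRest first bal l with
  | none => 0
  | some r => solBalt r

theorem solBalt_cons (c : Char) (rest : List Char) :
    solBalt (c :: rest) = 1 + contB c 1 rest := by
  rw [solBalt, contB]
  cases h : findRest c 1 rest <;> simp

-- ===== layer 1: A equals the reference scan =====
-- Combined invariant, strong induction on length:
-- (i)  from the reset state, A's remaining run yields ans + solBalt l;
-- (ii) mid-segment (x = some f, counts sc ≠ dc), A's remaining run yields
--      ans + 1 + contB f (sc - dc) l  (the balance is the counter difference).
theorem solution_main (n : ℕ) :
    ∀ l : List Char, l.length ≤ n →
      (∀ ans : Int,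
        solutionFinA (l.foldl solutionStepA (ans, none, 0, 0)) = ans + solBalt l) ∧
      (∀ (f : Char) (sc dc ans : Int), sc ≠ dc →
        solutionFinA (l.foldl solutionStepA (ans, some f, sc, dc))
          = ans + 1 + contB f (sc - dc) l) := by
  induction n with
  | zero =>
      intro l hl
      have : l = [] := List.eq_nil_of_length_eq_zero (Nat.le_zero.mp hl)
      subst this
      constructor
      · intro ans; simp [solutionFinA, solBalt]
      · intro f sc dc ans _; simp [solutionFinA, contB, findRest]
  | succ n ih =>
      intro l hl
      match l with
      | [] =>
          constructor
          · intro ans; simp [solutionFinA, solBalt]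
          · intro f sc dc ans _; simp [solutionFinA, contB, findRest]
      | c :: rest =>
          have hr : rest.length ≤ n := Nat.lt_succ_iff.mp (by simpa using hl)
          constructor
          · intro ans
            have h1 : solutionStepA (ans, none, 0, 0) c = (ans, some c, 1, 0) := by
              simp [solutionStepA]
            rw [List.foldl_cons, h1, (ih rest hr).2 c 1 0 ans (by norm_num),
                solBalt_cons]
            norm_num
            ring
          · intro f sc dc ans hne
            by_cases hc : c = f
            · subst hc
              by_cases he : sc + 1 = dc
              · have h1 : solutionStepA (ans, some c, sc, dc) c = (ans + 1, none, 0, 0) := by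
                  simp [solutionStepA, he]
                rw [List.foldl_cons, h1, (ih rest hr).1 (ans + 1)]
                have hb : sc - dc + 1 = 0 := by omega
                simp [contB, findRest, hb]
              · have h1 : solutionStepA (ans, some c, sc, dc) c = (ans, some c, sc + 1, dc) := by
                  simp [solutionStepA, he]
                have hb : sc - dc + 1 ≠ 0 := by omega
                rw [List.foldl_cons, h1, (ih rest hr).2 c (sc + 1) dc ans he]
                have hbe : sc + 1 - dc = sc - dc + 1 := by ring
                simp [contB, findRest, hb, hbe]
            · by_cases he : sc = dc + 1
              · have h1 : solutionStepA (ans, some f, sc, dc) c = (ans + 1, none, 0, 0) := by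
                  simp [solutionStepA, Ne.symm hc, he]
                rw [List.foldl_cons, h1, (ih rest hr).1 (ans + 1)]
                have hb : sc - dc + -1 = 0 := by omega
                simp [contB, findRest, hc, hb]
              · have h1 : solutionStepA (ans, some f, sc, dc) c = (ans, some f, sc, dc + 1) := by
                  simp [solutionStepA, Ne.symm hc, he]
                have hne2 : sc ≠ dc + 1 := he
                rw [List.foldl_cons, h1, (ih rest hr).2 f sc (dc + 1) ans hne2]
                have hb : sc - dc + -1 ≠ 0 := by omega
                have hbe : sc - (dc + 1) = sc - dc + -1 := by ring
                simp [contB, findRest, hc, hb, hbe]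

-- ===== layer 2: B equals the reference scan =====

-- "no occurrence of fc before position g in t", phrased as find's minimality gives it
theorem findRest_skip (fc : Char) :
    ∀ (t : List Char) (g : ℕ) (bal : Int), (g : Int) < bal →
      (∀ i < g, ¬ ([fc] <+: t.drop i)) →
      findRest fc bal t = findRest fc (bal - g) (t.drop g) := by
  intro t
  induction t with
  | nil => intro g bal _ _; simp [findRest]
  | cons a rest ih =>
      intro g bal hg hno
      match g with
      | 0 => simp
      | Nat.succ m =>
          have ha : a ≠ fc := by
            intro h
            exact hno 0 (Nat.succ_pos _) (by simp [h])
          have hb : bal + -1 ≠ 0 := by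
            have : (m : Int) + 1 < bal := by exact_mod_cast hg
            omega
          have hstep : findRest fc bal (a :: rest) = findRest fc (bal + -1) rest := by
            simp [findRest, ha, hb]
          rw [hstep, ih m (bal + -1) (by omega)
              (fun i hi => by simpa using hno (i + 1) (by omega))]
          have h3 : bal + -1 - (m : Int) = bal - ((m + 1 : ℕ) : Int) := by push_cast; ring
          rw [h3]
          simp

theorem findRest_stop (fc : Char) :
    ∀ (t : List Char) (k : ℕ), 1 ≤ k → k ≤ t.length →
      (∀ i < k, ¬ ([fc] <+: t.drop i)) →
      findRest fc (k : Int) t = some (t.drop k) := by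
  intro t
  induction t with
  | nil => intro k h1 h2 _; simp at h2; omega
  | cons a rest ih =>
      intro k h1 h2 hno
      have ha : a ≠ fc := by
        intro h
        exact hno 0 h1 (by simp [h])
      match k with
      | 1 => simp [findRest, ha]
      | Nat.succ (Nat.succ m) =>
          have hb : ((m : Int) + 2) + -1 ≠ 0 := by omega
          have hcast : ((m + 2 : ℕ) : Int) + -1 = ((m + 1 : ℕ) : Int) := by push_cast; ring
          have hstep : findRest fc ((m + 2 : ℕ) : Int) (a :: rest)
              = findRest fc ((m + 1 : ℕ) : Int) rest := by
            simp only [findRest, if_neg ha]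
            rw [hcast]
            simp only [ite_eq_right_iff]
            intro h
            omega
          rw [show (Nat.succ (Nat.succ m)) = m + 2 from rfl] at *
          rw [hstep, ih (m + 1) (by omega) (by simpa using h2)
              (fun i hi => by simpa using hno (i + 1) (by omega))]
          simp

theorem findRest_suffix (fc : Char) :
    ∀ (t : List Char) (bal : Int) (r : List Char),
      findRest fc bal t = some r → r <:+ t := by
  intro t
  induction t with
  | nil => intro bal r h; simp [findRest] at h
  | cons a rest ih =>
      intro bal r h
      simp only [findRest] at h
      split at h <;> split at h
      all_goals first
        | (cases h; exact (List.suffix_cons a rest))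
        | exact (ih _ _ h).trans (List.suffix_cons a rest)

theorem suffix_drop_eq {r l : List Char} (h : r <:+ l) :
    l.drop (l.length - r.length) = r := by
  obtain ⟨u, rfl⟩ := h
  simp

-- s.find(first, p) reduced to Chars.find on the suffix
theorem findFrom_char (s : String) (fc : Char) (p : ℕ) (hp : p ≤ s.toList.length) :
    PySem.Str.findFrom s (String.singleton fc) (p : Int)
      = if PySem.Chars.find (s.toList.drop p) [fc] = -1 then -1
        else (p : Int) + PySem.Chars.find (s.toList.drop p) [fc] := by
  rw [PySem.Str.findFrom_eq]
  rw [PySem.Chars.findFrom_natCast _ _ p (by simpa using hp)]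
  simp

theorem find_none_char (t : List Char) (fc : Char) (h : PySem.Chars.find t [fc] = -1) :
    ∀ i, ¬ ([fc] <+: t.drop i) := by
  intro i hpre
  have h2 : ¬ ([fc] <:+: t) := (PySem.Chars.find_eq_neg_one_iff t [fc]).mp h
  have h3 : PySem.Chars.isIn [fc] t = true :=
    (PySem.Chars.exists_prefix_drop_iff_isIn [fc] t).mp ⟨i, hpre⟩
  exact h2 ((PySem.Chars.isIn_iff_infix _ _).mp h3)

theorem find_pos_char (t : List Char) (fc : Char) (h : PySem.Chars.find t [fc] ≠ -1) :
    ∃ g : ℕ, PySem.Chars.find t [fc] = (g : Int) ∧ g < t.length ∧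
      (∀ i < g, ¬ ([fc] <+: t.drop i)) ∧ t.drop g = fc :: t.drop (g + 1) := by
  have h0 : 0 ≤ PySem.Chars.find t [fc] := by
    have := PySem.Chars.neg_one_le_find t [fc]
    omega
  obtain ⟨hpre, hmin⟩ := PySem.Chars.find_spec h0
  refine ⟨(PySem.Chars.find t [fc]).toNat, (Int.toNat_of_nonneg h0).symm, ?_, hmin, ?_⟩
  · by_contra hge
    rw [Nat.not_lt] at hge
    rw [List.drop_eq_nil_of_le hge] at hpre
    simp at hpre
  · obtain ⟨u, hu⟩ := hpre
    simp only [List.singleton_append] at hu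
    have hdrop : t.drop ((PySem.Chars.find t [fc]).toNat + 1) = u := by
      have := congrArg (List.drop 1) hu.symm
      simpa [List.drop_drop, Nat.add_comm] using this
    rw [← hu, hdrop]

theorem innerB_eq (s : String) (fc : Char) :
    ∀ (fuel p : ℕ) (bal : Int), 1 ≤ bal → p ≤ s.toList.length →
      s.toList.length - p < fuel →
      innerB s (s.toList.length : Int) fc fuel bal (p : Int)
        = match findRest fc bal (s.toList.drop p) with
          | some r => ((s.toList.length - r.length : ℕ) : Int)
          | none => (s.toList.length : Int) := by
  intro fuel
  induction fuel with
  | zero => intro p bal _ _ hf; omega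
  | succ fuel ih =>
      intro p bal hbal hp hf
      simp only [innerB]
      rw [findFrom_char s fc p hp]
      by_cases hneg : PySem.Chars.find (s.toList.drop p) [fc] = -1
      · have hno : ∀ i, ¬ ([fc] <+: (s.toList.drop p).drop i) :=
          find_none_char _ fc hneg
        simp only [hneg, reduceIte]
        by_cases hb : bal ≤ (s.toList.length : Int) - (p : Int)
        · obtain ⟨k, hk⟩ : ∃ k : ℕ, bal = (k : Int) := ⟨bal.toNat, by omega⟩
          subst hk
          have hstop := findRest_stop fc (s.toList.drop p) k (by omega)
            (by simp only [List.length_drop]; omega) (fun i _ => hno i)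
          rw [if_pos hb, hstop]
          simp only [List.length_drop]
          rw [show s.toList.length - (s.toList.length - p - k) = p + k from by omega]
          push_cast
          ring
        · have hskip := findRest_skip fc (s.toList.drop p) (s.toList.drop p).length bal
            (by simp only [List.length_drop]; omega) (fun i _ => hno i)
          rw [if_neg hb]
          rw [hskip, List.length_drop, List.drop_drop]
          rw [show p + (s.toList.length - p) = s.toList.length from by omega, List.drop_length]
          simp [findRest]
      · obtain ⟨g, hg, hglt, hgmin, hgdrop⟩ := find_pos_char _ fc hneg
        have hglen : g < s.toList.length - p := by
          simpa using hglt
        have hq0 : ¬ ((p : Int) + PySem.Chars.find (s.toList.drop p) [fc] = -1) := by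
          rw [hg]; omega
        rw [if_neg hneg, if_neg hq0, hg]
        by_cases hb : bal ≤ (p : Int) + (g : Int) - (p : Int)
        · obtain ⟨k, hk⟩ : ∃ k : ℕ, bal = (k : Int) := ⟨bal.toNat, by omega⟩
          subst hk
          have hstop := findRest_stop fc (s.toList.drop p) k (by omega)
            (by simp only [List.length_drop]; omega)
            (fun i hi => hgmin i (by omega))
          rw [if_pos hb, hstop]
          simp only [List.length_drop]
          rw [show s.toList.length - (s.toList.length - p - k) = p + k from by omega]
          push_cast
          ring
        · have hqn : ¬ ((p : Int) + (g : Int) = (s.toList.length : Int)) := by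
            omega
          rw [if_neg hb, if_neg hqn]
          have hskip := findRest_skip fc (s.toList.drop p) g bal (by omega)
            hgmin
          have hdd : (s.toList.drop p).drop (g + 1) = s.toList.drop (p + g + 1) := by
            rw [List.drop_drop]
            congr 1
          have hbal2 : bal - (g : Int) + 1 ≠ 0 := by omega
          have hone : findRest fc (bal - (g : Int)) ((s.toList.drop p).drop g)
              = findRest fc (bal - (g : Int) + 1) (s.toList.drop (p + g + 1)) := by
            rw [hgdrop, ← hdd]
            simp [findRest, hbal2]
          have hcast : (p : Int) + (g : Int) + 1 = ((p + g + 1 : ℕ) : Int) := by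
            push_cast; ring
          rw [hcast]
          rw [show bal + (1 - ((p : Int) + (g : Int) - (p : Int))) = bal - (g : Int) + 1
              from by ring]
          rw [ih (p + g + 1) (bal - (g : Int) + 1) (by omega) (by omega) (by omega),
              hskip, hone]

theorem outerB_eq (s : String) :
    ∀ (fuel i : ℕ) (ans : Int), i ≤ s.toList.length →
      s.toList.length - i < fuel →
      outerB s (s.toList.length : Int) fuel ans (i : Int)
        = ans + solBalt (s.toList.drop i) := by
  intro fuel
  induction fuel with
  | zero => intro i ans _ hf; omega
  | succ fuel ih =>
      intro i ans hi hf
      simp only [outerB]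
      by_cases hlt : (i : Int) < (s.toList.length : Int)
      · have hiN : i < s.toList.length := by exact_mod_cast hlt
        rw [if_pos hlt]
        have hget : (PySem.Str.pyGet? s (i : Int)).getD ' ' = s.toList[i] := by
          simp [PySem.Str.pyGet?_eq, PySem.Chars.pyGet?, PySem.List.pyGet?_natCast,
                List.getElem?_eq_getElem hiN]
        rw [hget]
        have hcast1 : (i : Int) + 1 = ((i + 1 : ℕ) : Int) := by push_cast; ring
        rw [hcast1, innerB_eq s (s.toList[i]) (s.toList.length + 1) (i + 1) 1
              le_rfl hiN (by omega)]
        have hdropi : s.toList.drop i = s.toList[i] :: s.toList.drop (i + 1) :=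
          List.drop_eq_getElem_cons hiN
        rw [hdropi, solBalt_cons, contB]
        cases h : findRest (s.toList[i]) 1 (s.toList.drop (i + 1)) with
        | none =>
            have hz : solBalt ([] : List Char) = 0 := by simp [solBalt]
            rw [ih s.toList.length (ans + 1) le_rfl (by omega), List.drop_length, hz]
            ring
        | some r =>
            have hsuf : r <:+ s.toList :=
              (findRest_suffix _ _ _ _ h).trans (List.drop_suffix _ _)
            have hrlen : r.length ≤ (s.toList.drop (i + 1)).length :=
              findRest_length_le _ _ _ _ h
            simp only [List.length_drop] at hrlen
            rw [ih (s.toList.length - r.length) (ans + 1)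
                  (by omega) (by omega),
                suffix_drop_eq hsuf]
            ring
      · have hiN : i = s.toList.length := by
          have : ¬ (i < s.toList.length) := fun hc => hlt (by exact_mod_cast hc)
          omega
        rw [if_neg hlt, hiN, List.drop_length]
        simp [solBalt]

-- ===== VERDICT (by name: the statement is the Claim_ definition above) =====
theorem solution_spec : Claim_equal_solution := by
  intro s _
  unfold Spec_solution solution solution_alt
  have hA := (solution_main s.toList.length s.toList le_rfl).1 0
  have hB := outerB_eq s (s.toList.length + 1) 0 0 (Nat.zero_le _) (by omega)
  simp only [Nat.cast_zero, String.length_toList] at hB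
  simp only [PySem.Str.len_eq, String.length_toList]
  simpa [String.length_toList, hB] using hA
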